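-- pv_equiv track=rewrite | github.com/Mifour/Algorithms | algopro/multitasking.py | multitasking
-- ===== SOURCE A (Python) =====
-- def multitasking(array, cooldown):
-- 	# given an array of jobs to do and a cooldown time, return the time amount needed to proceed these jobs.
-- 	# Same jobs have to wait the previous cooldown.
-- 	# I.E. [1,1,2,1], cooldown=2 => 7
-- 	# 1,_,_,1,_,_,1,_,_
-- 	#         2,_,_
-- 	# O(n) time & space
--
-- 	dico = {job:-1 for job in array}
-- 	time = 0
-- 	while array:
-- 		job = array[0]
-- 		if dico[job] <  time :
-- 			dico[job] = time + cooldown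
-- 			array.remove(job)
-- 		time+=1
-- 	return time
-- ===== SOURCE B (Python) =====
-- def multitasking(array, cooldown):
--     # Single pass: track each job's lockout-end time; start = max(now, last[job]+1).
--     # Does not mutate `array` (A empties it in place); return value matches A.
--     last = {}
--     time = 0
--     for job in array:
--         start = max(time, last.get(job, -1) + 1)
--         last[job] = start + cooldown
--         time = start + 1
--     return time
-- ===== Notes on version B (the rewrite author's own statement) =====
-- stated objective: faster
-- what changed: Replaced A's tick-by-tick simulation (a while loop that increments time once per clock tick and busy-waits through cooldowns, with list.remove) by a single pass over the jobs that jumps each job's start time directly to max(time, last[job]+1) using a dict of lockout-end times.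
import Mathlib
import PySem

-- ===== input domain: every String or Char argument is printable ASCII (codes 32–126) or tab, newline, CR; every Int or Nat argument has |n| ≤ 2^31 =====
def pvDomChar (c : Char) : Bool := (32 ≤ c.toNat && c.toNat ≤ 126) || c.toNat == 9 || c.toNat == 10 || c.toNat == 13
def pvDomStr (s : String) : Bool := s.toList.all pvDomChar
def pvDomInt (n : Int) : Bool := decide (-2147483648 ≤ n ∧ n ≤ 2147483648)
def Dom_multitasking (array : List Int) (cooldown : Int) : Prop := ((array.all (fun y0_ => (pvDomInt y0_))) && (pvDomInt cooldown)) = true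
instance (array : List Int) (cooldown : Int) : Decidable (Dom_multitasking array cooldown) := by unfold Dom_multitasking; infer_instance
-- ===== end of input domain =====

-- B replaces A's tick-by-tick busy-wait loop (O(n·T) in the finish time T) with a single
-- pass that jumps each job's start to max(now, last[job]+1): an asymptotic speed-up.
-- Note: A empties `array` in place via array.remove; B does not mutate it — the
-- equivalence proved here is about the return value only.


-- ===== PORT A =====
-- the `while array:` loop; `job = array[0]` is the head, and `array.remove(job)`
-- removes the first occurrence of `job`, which is the head itself, so it leaves `rest`.
-- `dico[job]` never raises (dico is keyed by every element of array), ported as getD _ 0.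
def multitaskingLoop (cooldown : Int) (dico : PySem.Dict Int Int) (array : List Int)
    (time : Int) : Int :=
  match array with
  | [] => time
  | job :: rest =>
      if dico.getD job 0 < time then
        multitaskingLoop cooldown (dico.insert job (time + cooldown)) rest (time + 1)
      else
        multitaskingLoop cooldown dico (job :: rest) (time + 1)
  termination_by (array.length, (dico.getD (array.headD 0) 0 + 1 - time).toNat)
  decreasing_by
  · simp_all only [List.headD_cons]
    exact Prod.Lex.left _ _ (by simp)
  · simp_all only [not_lt, List.headD_cons]
    exact Prod.Lex.right _ (by omega)

def multitasking (array : List Int) (cooldown : Int) : Int :=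
  -- dico = {job: -1 for job in array}
  let dico := array.foldl (fun d job => d.insert job (-1)) PySem.Dict.empty
  multitaskingLoop cooldown dico array 0

-- ===== PORT B =====
def multitasking_alt (array : List Int) (cooldown : Int) : Int :=
  (array.foldl
    (fun (st : PySem.Dict Int Int × Int) job =>
      let start := max st.2 (st.1.getD job (-1) + 1)
      (st.1.insert job (start + cooldown), start + 1))
    (PySem.Dict.empty, 0)).2

-- ===== PRECONDITION & SPEC =====
def Spec_multitasking (array : List Int) (cooldown : Int) (out : Int) : Prop := out = multitasking_alt array cooldown
instance (array : List Int) (cooldown : Int) (out : Int) : Decidable (Spec_multitasking array cooldown out) := by unfold Spec_multitasking; infer_instance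

-- ===== CLAIM (what is proved, stated in full; the proofs are below) =====
def Claim_equal_multitasking : Prop := ∀ (array : List Int) (cooldown : Int), Dom_multitasking array cooldown → Spec_multitasking array cooldown (multitasking array cooldown)

-- ===== LEMMAS AND PROOFS =====

-- A's busy-wait on the head job collapses to one jump: start = max time (dico[job]+1).
theorem multitaskingLoop_cons (cooldown : Int) (dico : PySem.Dict Int Int) (job : Int)
    (rest : List Int) (time : Int) :
    multitaskingLoop cooldown dico (job :: rest) time =
      multitaskingLoop cooldown
        (dico.insert job (max time (dico.getD job 0 + 1) + cooldown)) rest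
        (max time (dico.getD job 0 + 1) + 1) := by
  by_cases h : dico.getD job 0 < time
  · rw [multitaskingLoop]
    simp only [h, if_true]
    have : max time (dico.getD job 0 + 1) = time := by omega
    rw [this]
  · have hk : (dico.getD job 0 + 1 - time).toNat ≠ 0 := by omega
    generalize hgen : (dico.getD job 0 + 1 - time).toNat = k at *
    induction k generalizing time with
    | zero => omega
    | succ n ih =>
      rw [multitaskingLoop]
      simp only [h, if_false]
      by_cases h' : dico.getD job 0 < time + 1
      · rw [multitaskingLoop]
        simp only [h', if_true]
        have h1 : max time (dico.getD job 0 + 1) = time + 1 := by omega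
        have h2 : max (time + 1) (dico.getD job 0 + 1) = time + 1 := by omega
        rw [h1]
      · rcases Nat.eq_zero_or_pos n with hn | hn
        · omega
        · have := ih (time + 1) h' (by omega) (by omega)
          rw [this]
          have : max (time + 1) (dico.getD job 0 + 1) = max time (dico.getD job 0 + 1) := by omega
          rw [this]

-- initialisation: {job: -1 for job in array} gives -1 on every key of array
theorem getD_foldl_insert_neg_one (l : List Int) (d : PySem.Dict Int Int) (j : Int) :
    (l.foldl (fun d job => d.insert job (-1)) d).getD j 0 =
      if j ∈ l then -1 else d.getD j 0 := by
  induction l generalizing d with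
  | nil => simp
  | cons x xs ih =>
    simp only [List.foldl_cons, ih, PySem.Dict.getD_insert, List.mem_cons]
    by_cases h1 : j ∈ xs <;> by_cases h2 : j = x <;> simp [h1, h2]

-- invariant: the two dictionaries agree (with B's default -1) on every remaining job
theorem loop_eq_fold (array : List Int) (cooldown : Int)
    (dico last : PySem.Dict Int Int) (time : Int)
    (hinv : ∀ j ∈ array, dico.getD j 0 = last.getD j (-1)) :
    multitaskingLoop cooldown dico array time =
      (array.foldl
        (fun (st : PySem.Dict Int Int × Int) job =>
          let start := max st.2 (st.1.getD job (-1) + 1)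
          (st.1.insert job (start + cooldown), start + 1))
        (last, time)).2 := by
  induction array generalizing dico last time with
  | nil => simp [multitaskingLoop]
  | cons job rest ih =>
    rw [multitaskingLoop_cons, List.foldl_cons]
    simp only
    have hjob : dico.getD job 0 = last.getD job (-1) := hinv job (by simp)
    rw [hjob]
    apply ih
    intro j hj
    rw [PySem.Dict.getD_insert, PySem.Dict.getD_insert]
    split_ifs with h
    · rfl
    · exact hinv j (by simp [hj])

-- ===== VERDICT (by name: the statement is the Claim_ definition above) =====
theorem multitasking_spec : Claim_equal_multitasking := by
  intro array cooldown _
  unfold Spec_multitasking multitasking multitasking_alt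
  simp only
  apply loop_eq_fold
  intro j hj
  rw [getD_foldl_insert_neg_one, PySem.Dict.getD_empty]
  simp [hj]
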